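-- pv_equiv track=rewrite | github.com/hishamnasrallah/django_generator | generator/core/template_engine.py | _comment_filter
-- ===== SOURCE A (Python) =====
-- def _comment_filter(text: str, style: str = 'python') -> str:
--     """Add comment markers to text."""
--     if not text:
--         return text
--
--     comment_styles = {
--         'python': '# ',
--         'javascript': '// ',
--         'css': '/* ',
--         'html': '<!-- ',
--         'sql': '-- ',
--     }
--
--     prefix = comment_styles.get(style, '# ')
--     lines = text.split('\n')
--
--     if style == 'css':
--         return '/* ' + ' */\n/* '.join(lines) + ' */'
--     elif style == 'html':
--         return '<!-- ' + ' -->\n<!-- '.join(lines) + ' -->'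
--     else:
--         return '\n'.join(prefix + line for line in lines)
-- ===== SOURCE B (Python) =====
-- def _comment_filter(text: str, style: str = 'python') -> str:
--     """Add comment markers to text."""
--     if not text:
--         return text
--
--     styles = {
--         'python': ('# ', ''),
--         'javascript': ('// ', ''),
--         'css': ('/* ', ' */'),
--         'html': ('<!-- ', ' -->'),
--         'sql': ('-- ', ''),
--     }
--     prefix, suffix = styles.get(style, ('# ', ''))
--
--     # Single streaming scan over the characters: no split, no join of lines.
--     out = [prefix]
--     for ch in text:
--         if ch == '\n':
--             out.append(suffix)
--             out.append('\n')
--             out.append(prefix)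
--         else:
--             out.append(ch)
--     out.append(suffix)
--     return ''.join(out)
-- ===== Notes on version B (the rewrite author's own statement) =====
-- stated objective: alternative
-- what changed: Replaced A's split-into-lines plus join (with the css/html separator-join trick) by a single streaming scan over the characters that emits prefix/suffix around each newline into one output accumulator.
import Mathlib
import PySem

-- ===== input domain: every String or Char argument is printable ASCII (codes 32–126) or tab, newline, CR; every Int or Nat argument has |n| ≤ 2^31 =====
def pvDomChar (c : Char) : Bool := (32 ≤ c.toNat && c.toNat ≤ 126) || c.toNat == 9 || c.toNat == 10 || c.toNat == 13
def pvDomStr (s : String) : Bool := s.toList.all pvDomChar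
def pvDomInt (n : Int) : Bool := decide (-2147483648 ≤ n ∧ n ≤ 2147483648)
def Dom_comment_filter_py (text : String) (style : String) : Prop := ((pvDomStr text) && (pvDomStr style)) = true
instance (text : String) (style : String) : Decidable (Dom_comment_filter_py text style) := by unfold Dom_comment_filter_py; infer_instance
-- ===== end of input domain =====

-- B replaces A's split-into-lines-then-join construction (with its css/html separator-join
-- trick) by a single streaming scan over the characters with an output accumulator (objective: alternative).

-- ===== PORT A =====
-- Python string concatenation/join is ported on List Char (PySem.Chars; exact) and rebuilt with String.ofList.
def comment_filter_py (text : String) (style : String) : String :=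
  if text == "" then text
  else
    let styles : PySem.Dict String String :=
      PySem.Dict.ofList [("python", "# "), ("javascript", "// "), ("css", "/* "),
                         ("html", "<!-- "), ("sql", "-- ")]
    let pre := styles.getD style "# "
    let lines := PySem.Chars.splitOn text.toList ['\n']
    if style == "css" then
      String.ofList ("/* ".toList ++ PySem.Chars.join " */\n/* ".toList lines ++ " */".toList)
    else if style == "html" then
      String.ofList ("<!-- ".toList ++ PySem.Chars.join " -->\n<!-- ".toList lines ++ " -->".toList)
    else
      String.ofList (PySem.Chars.join ['\n'] (lines.map (fun line => pre.toList ++ line)))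

-- ===== PORT B =====
-- B: one fold over the characters; out starts with the prefix, each '\n' emits suffix+'\n'+prefix,
-- and the suffix is appended at the end (the ''.join of Python's list of pieces is the ++ here).
def comment_filter_py_alt (text : String) (style : String) : String :=
  if text == "" then text
  else
    let styles : PySem.Dict String (String × String) :=
      PySem.Dict.ofList [("python", ("# ", "")), ("javascript", ("// ", "")),
                         ("css", ("/* ", " */")), ("html", ("<!-- ", " -->")),
                         ("sql", ("-- ", ""))]
    let ps := styles.getD style ("# ", "")
    String.ofList
      ((text.toList.foldl
          (fun acc c =>
            if c = '\n' then acc ++ ps.2.toList ++ '\n' :: ps.1.toList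
            else acc ++ [c])
          ps.1.toList) ++ ps.2.toList)

-- ===== PRECONDITION & SPEC =====
def Spec_comment_filter_py (text : String) (style : String) (out : String) : Prop := out = comment_filter_py_alt text style
instance (text : String) (style : String) (out : String) : Decidable (Spec_comment_filter_py text style out) := by unfold Spec_comment_filter_py; infer_instance

-- ===== CLAIM (what is proved, stated in full; the proofs are below) =====
def Claim_equal_comment_filter_py : Prop := ∀ (text : String) (style : String), Dom_comment_filter_py text style → Spec_comment_filter_py text style (comment_filter_py text style)

-- ===== LEMMAS AND PROOFS =====

-- Reference split on '\n' (proof-only): structural recursion, no fuel/accumulator.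
def splitNl : List Char → List (List Char)
  | [] => [[]]
  | c :: rest => if c = '\n' then [] :: splitNl rest else (splitNl rest).modifyHead (c :: ·)

lemma splitNl_ne_nil (s : List Char) : splitNl s ≠ [] := by
  induction s with
  | nil => simp [splitNl]
  | cons c rest ih =>
    simp only [splitNl]
    split
    · simp
    · cases h : splitNl rest with
      | nil => exact absurd h ih
      | cons a as => simp

lemma splitOn_go_eq (fuel : Nat) (l cur : List Char) (acc : List (List Char))
    (h : l.length < fuel) :
    PySem.Chars.splitOn.go ['\n'] fuel l cur acc
      = acc.reverse ++ (splitNl l).modifyHead (cur.reverse ++ ·) := by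
  induction fuel generalizing l cur acc with
  | zero => omega
  | succ n ih =>
    cases l with
    | nil => simp [PySem.Chars.splitOn.go, splitNl]
    | cons c rest =>
      rw [PySem.Chars.splitOn.go]
      by_cases hc : c = '\n'
      · subst hc
        rw [if_pos (by simp [List.isPrefixOf])]
        rw [ih _ _ _ (by simpa using Nat.lt_of_succ_lt_succ h)]
        cases hsp : splitNl rest with
        | nil => exact absurd hsp (splitNl_ne_nil rest)
        | cons a as => simp [splitNl, hsp]
      · rw [if_neg (by simp [List.isPrefixOf, Ne.symm hc])]
        rw [ih _ _ _ (by simpa using Nat.lt_of_succ_lt_succ h)]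
        cases hsp : splitNl rest with
        | nil => exact absurd hsp (splitNl_ne_nil rest)
        | cons a as => simp [splitNl, hsp, hc]

lemma splitOn_eq_splitNl (s : List Char) :
    PySem.Chars.splitOn s ['\n'] = splitNl s := by
  rw [PySem.Chars.splitOn, splitOn_go_eq _ _ _ _ (by omega)]
  cases h : splitNl s with
  | nil => exact absurd h (splitNl_ne_nil s)
  | cons a as => simp

-- The streaming scan, fold-free (proof-only helper).
def streamRec (pre suf : List Char) : List Char → List Char
  | [] => suf
  | c :: rest => if c = '\n' then suf ++ '\n' :: (pre ++ streamRec pre suf rest)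
                 else c :: streamRec pre suf rest

-- B's foldl, flushed with the trailing suffix, equals acc ++ streamRec.
lemma foldl_eq_streamRec (pre suf : List Char) :
    ∀ (s acc : List Char),
      (s.foldl (fun acc c => if c = '\n' then acc ++ suf ++ '\n' :: pre else acc ++ [c]) acc) ++ suf
        = acc ++ streamRec pre suf s := by
  intro s
  induction s with
  | nil => intro acc; simp [streamRec]
  | cons c rest ih =>
    intro acc
    simp only [List.foldl_cons]
    by_cases hc : c = '\n'
    · rw [if_pos hc, ih]
      simp only [streamRec, if_pos hc]
      simp
    · rw [if_neg hc, ih]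
      simp only [streamRec, if_neg hc]
      simp

-- The per-line characterisation of the stream.
lemma streamRec_eq (pre suf : List Char) :
    ∀ (s h : List Char) (t : List (List Char)), splitNl s = h :: t →
      streamRec pre suf s = h ++ suf ++ (t.map (fun l => '\n' :: (pre ++ l ++ suf))).flatten := by
  intro s
  induction s with
  | nil =>
    intro h t hsp
    simp [splitNl] at hsp
    simp [streamRec, hsp.1, hsp.2]
  | cons c rest ih =>
    intro h t hsp
    by_cases hc : c = '\n'
    · subst hc
      simp only [splitNl] at hsp
      obtain ⟨rfl, rfl⟩ : h = [] ∧ splitNl rest = t := ⟨(List.cons.injEq _ _ _ _ ▸ hsp).1.symm, (List.cons.injEq _ _ _ _ ▸ hsp).2⟩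
      cases hr : splitNl rest with
      | nil => exact absurd hr (splitNl_ne_nil rest)
      | cons a as =>
        simp only [streamRec]
        rw [ih a as hr]
        simp
    · simp only [splitNl, if_neg hc] at hsp
      cases hr : splitNl rest with
      | nil => exact absurd hr (splitNl_ne_nil rest)
      | cons a as =>
        rw [hr] at hsp
        simp only [List.modifyHead] at hsp
        obtain ⟨rfl, rfl⟩ : h = c :: a ∧ as = t := ⟨(List.cons.injEq _ _ _ _ ▸ hsp).1.symm, (List.cons.injEq _ _ _ _ ▸ hsp).2⟩
        simp only [streamRec, if_neg hc]
        rw [ih a as hr]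
        simp

-- The join of wrapped lines has the same flattened shape.
lemma join_wrap_eq (pre suf : List Char) (h : List Char) (t : List (List Char)) :
    PySem.Chars.join ['\n'] ((h :: t).map (fun l => pre ++ l ++ suf))
      = (pre ++ h ++ suf) ++ (t.map (fun l => '\n' :: (pre ++ l ++ suf))).flatten := by
  induction t generalizing h with
  | nil => simp [PySem.Chars.join_singleton]
  | cons b bs ih =>
    simp only [List.map_cons] at ih ⊢
    rw [PySem.Chars.join_cons_cons, ih b]
    simp

-- The key bridge: prefix ++ stream = join of wrapped lines.
lemma pre_streamRec_eq_join (pre suf s : List Char) :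
    pre ++ streamRec pre suf s
      = PySem.Chars.join ['\n'] ((splitNl s).map (fun l => pre ++ l ++ suf)) := by
  cases hsp : splitNl s with
  | nil => exact absurd hsp (splitNl_ne_nil s)
  | cons h t =>
    rw [streamRec_eq pre suf s h t hsp, join_wrap_eq]
    simp

-- A's 'pre + sep.join(lines) + suf' trick equals the uniform per-line wrap.
lemma wrap_join (p suf nl : List Char) :
    ∀ (ls : List (List Char)), ls ≠ [] →
      p ++ PySem.Chars.join (suf ++ nl ++ p) ls ++ suf
        = PySem.Chars.join nl (ls.map (fun l => p ++ l ++ suf)) := by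
  intro ls
  induction ls with
  | nil => intro h; exact absurd rfl h
  | cons a rest ih =>
    intro _
    cases rest with
    | nil => simp [PySem.Chars.join_singleton]
    | cons b rs =>
      have h2 := ih (by simp)
      simp only [List.map_cons] at h2 ⊢
      rw [PySem.Chars.join_cons_cons, PySem.Chars.join_cons_cons, ← h2]
      simp [List.append_assoc]

-- ===== VERDICT (by name: the statement is the Claim_ definition above) =====
theorem comment_filter_py_spec : Claim_equal_comment_filter_py := by
  intro text style _
  unfold Spec_comment_filter_py comment_filter_py comment_filter_py_alt
  by_cases hempty : text == ""
  · simp [hempty]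
  · simp only [hempty]
    -- rewrite B's side into the join-of-wrapped-lines form
    have hB : ∀ (pre suf : List Char),
        (text.toList.foldl
            (fun acc c => if c = '\n' then acc ++ suf ++ '\n' :: pre else acc ++ [c]) pre) ++ suf
          = PySem.Chars.join ['\n'] ((splitNl text.toList).map (fun l => pre ++ l ++ suf)) := by
      intro pre suf
      rw [foldl_eq_streamRec, pre_streamRec_eq_join]
    by_cases hcss : style = "css"
    · subst hcss
      have hw := wrap_join "/* ".toList " */".toList ['\n'] (splitNl text.toList)
        (splitNl_ne_nil _)
      show String.ofList ("/* ".toList ++ PySem.Chars.join " */\n/* ".toList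
          (PySem.Chars.splitOn text.toList ['\n']) ++ " */".toList)
        = String.ofList ((text.toList.foldl
            (fun acc c => if c = '\n' then acc ++ " */".toList ++ '\n' :: "/* ".toList
                          else acc ++ [c]) "/* ".toList) ++ " */".toList)
      rw [splitOn_eq_splitNl, hB "/* ".toList " */".toList]
      exact congrArg String.ofList (by simpa using hw)
    · by_cases hhtml : style = "html"
      · subst hhtml
        have hw := wrap_join "<!-- ".toList " -->".toList ['\n'] (splitNl text.toList)
          (splitNl_ne_nil _)
        show String.ofList ("<!-- ".toList ++ PySem.Chars.join " -->\n<!-- ".toList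
            (PySem.Chars.splitOn text.toList ['\n']) ++ " -->".toList)
          = String.ofList ((text.toList.foldl
              (fun acc c => if c = '\n' then acc ++ " -->".toList ++ '\n' :: "<!-- ".toList
                            else acc ++ [c]) "<!-- ".toList) ++ " -->".toList)
        rw [splitOn_eq_splitNl, hB "<!-- ".toList " -->".toList]
        exact congrArg String.ofList (by simpa using hw)
      · have hc : ¬ ((style == "css") = true) := by simp [hcss]
        have hh : ¬ ((style == "html") = true) := by simp [hhtml]
        rw [if_neg hc, if_neg hh]
        -- both sides look up the same prefix; B's suffix is ""
        have e1 : (PySem.Dict.ofList [("python", "# "), ("javascript", "// "), ("css", "/* "),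
            ("html", "<!-- "), ("sql", "-- ")] : PySem.Dict String String)
            = PySem.Dict.mk [("python", "# "), ("javascript", "// "), ("css", "/* "),
            ("html", "<!-- "), ("sql", "-- ")] := rfl
        have e2 : (PySem.Dict.ofList [("python", ("# ", "")), ("javascript", ("// ", "")),
            ("css", ("/* ", " */")), ("html", ("<!-- ", " -->")),
            ("sql", ("-- ", ""))] : PySem.Dict String (String × String))
            = PySem.Dict.mk [("python", ("# ", "")), ("javascript", ("// ", "")),
            ("css", ("/* ", " */")), ("html", ("<!-- ", " -->")),
            ("sql", ("-- ", ""))] := rfl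
        have hcr : ("css" == style) = false := by simpa using Ne.symm hcss
        have hhr : ("html" == style) = false := by simpa using Ne.symm hhtml
        have key : ∀ (pre : String),
            PySem.Chars.join ['\n']
                ((PySem.Chars.splitOn text.toList ['\n']).map (fun line => pre.toList ++ line))
              = (text.toList.foldl
                  (fun acc c => if c = '\n' then acc ++ ("" : String).toList ++ '\n' :: pre.toList
                                else acc ++ [c]) pre.toList) ++ ("" : String).toList := by
          intro pre
          rw [hB pre.toList ("" : String).toList, splitOn_eq_splitNl]
          simp
        simp only [e1, e2, PySem.Dict.getD, PySem.Dict.get?_mk_cons, hcr, hhr,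
          Bool.false_eq_true, if_false]
        split_ifs with h1 h2 h3
        · exact congrArg String.ofList (by simpa [PySem.Dict.get?] using key "# ")
        · exact congrArg String.ofList (by simpa [PySem.Dict.get?] using key "// ")
        · exact congrArg String.ofList (by simpa [PySem.Dict.get?] using key "-- ")
        · exact congrArg String.ofList (by simpa [PySem.Dict.get?] using key "# ")
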